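-- pv_equiv track=rewrite | github.com/ehallenborg/codewarssolutions | katas/printer-errors.py | printer_error
-- ===== SOURCE A (Python) =====
-- def printer_error(s):
--     alphabet = set(list(map(chr, range(97, 110))))
--     set_s = set(s)
--     diff = 0
--
--     if set_s.issubset(alphabet):
--         return "0/" + str(len(s))
--     else:
--         for i in s:
--             if i not in alphabet:
--                 diff += 1
--
--     return str(diff) + "/" + str(len(s))
-- ===== SOURCE B (Python) =====
-- def printer_error(s):
--     freq = {}
--     for ch in s:
--         freq[ch] = freq.get(ch, 0) + 1
--     diff = sum(n for ch, n in freq.items() if not ('a' <= ch <= 'm'))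
--     return f"{diff}/{len(s)}"
-- ===== Notes on version B (the rewrite author's own statement) =====
-- stated objective: alternative
-- what changed: B replaces A's set-issubset shortcut plus per-character membership loop with a single frequency-table build (dict of counts) and then sums the counts of the distinct characters outside 'a'..'m'; the subset special case disappears since the sum is 0 exactly then.
import Mathlib
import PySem

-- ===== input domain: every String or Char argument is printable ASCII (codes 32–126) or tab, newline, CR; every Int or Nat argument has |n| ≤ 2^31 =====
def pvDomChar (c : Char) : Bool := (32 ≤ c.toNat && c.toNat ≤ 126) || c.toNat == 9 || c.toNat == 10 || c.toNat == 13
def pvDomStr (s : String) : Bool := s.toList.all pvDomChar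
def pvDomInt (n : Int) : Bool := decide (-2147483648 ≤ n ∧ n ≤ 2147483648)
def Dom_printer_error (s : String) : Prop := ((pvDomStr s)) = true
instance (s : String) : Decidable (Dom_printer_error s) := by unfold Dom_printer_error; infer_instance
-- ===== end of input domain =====

-- B replaces A's issubset shortcut + per-character membership loop by one frequency table summed over the distinct characters outside 'a'..'m' (alternative decomposition, same cost).

-- ===== PORT A =====
def printer_error (s : String) : String :=
  -- alphabet = set(list(map(chr, range(97, 110)))); chr ported by hand as Char.ofNat (exact here: codes 97..109 are valid ASCII)
  let alphabet : PySem.Set Char :=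
    PySem.Set.ofList ((PySem.List.pyRange 97 110 1).map (fun n => Char.ofNat n.toNat))
  let set_s : PySem.Set Char := PySem.Set.ofList s.toList
  let diff : Int := 0
  if PySem.Set.issubset set_s alphabet then
    "0/" ++ PySem.Int.toStr (PySem.Str.len s)
  else
    let diff := s.toList.foldl (fun d i => if !(PySem.Set.contains alphabet i) then d + 1 else d) diff
    PySem.Int.toStr diff ++ "/" ++ PySem.Int.toStr (PySem.Str.len s)

-- ===== PORT B =====
def printer_error_alt (s : String) : String :=
  let freq : PySem.Dict Char Int :=
    s.toList.foldl (fun d ch => d.insert ch (d.getD ch 0 + 1)) PySem.Dict.empty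
  let diff : Int :=
    ((freq.items.filter (fun p => !(decide ('a' ≤ p.1) && decide (p.1 ≤ 'm')))).map (·.2)).sum
  PySem.Int.toStr diff ++ "/" ++ PySem.Int.toStr (PySem.Str.len s)

-- ===== PRECONDITION & SPEC =====
def Spec_printer_error (s : String) (out : String) : Prop := out = printer_error_alt s
instance (s : String) (out : String) : Decidable (Spec_printer_error s out) := by unfold Spec_printer_error; infer_instance

-- ===== CLAIM (what is proved, stated in full; the proofs are below) =====
def Claim_equal_printer_error : Prop := ∀ (s : String), Dom_printer_error s → Spec_printer_error s (printer_error s)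

-- ===== LEMMAS AND PROOFS =====

-- A's alphabet set is literally the characters 'a'..'m'
theorem alphabet_eq :
    PySem.Set.ofList ((PySem.List.pyRange 97 110 1).map (fun n => Char.ofNat n.toNat))
      = ['a','b','c','d','e','f','g','h','i','j','k','l','m'] := by decide

-- membership in that literal list is exactly the range test B uses
theorem mem_alphabet (c : Char) :
    PySem.Set.contains (['a','b','c','d','e','f','g','h','i','j','k','l','m'] : PySem.Set Char) c
      = ('a' ≤ c && c ≤ 'm') := by
  simp only [PySem.Set.contains, List.contains_eq_mem, List.mem_cons, List.not_mem_nil, or_false,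
    Char.ext_iff, Char.le_def, UInt32.ext_iff, UInt32.le_iff_toNat_le]
  rw [Bool.eq_iff_iff]
  simp only [decide_eq_true_eq, Bool.and_eq_true,
    show 'a'.val.toNat = 97 from rfl, show 'b'.val.toNat = 98 from rfl,
    show 'c'.val.toNat = 99 from rfl, show 'd'.val.toNat = 100 from rfl,
    show 'e'.val.toNat = 101 from rfl, show 'f'.val.toNat = 102 from rfl,
    show 'g'.val.toNat = 103 from rfl, show 'h'.val.toNat = 104 from rfl,
    show 'i'.val.toNat = 105 from rfl, show 'j'.val.toNat = 106 from rfl,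
    show 'k'.val.toNat = 107 from rfl, show 'l'.val.toNat = 108 from rfl,
    show 'm'.val.toNat = 109 from rfl]
  omega

-- B's sum over the frequency table is the count of out-of-range characters in the whole string
theorem diffB_eq (xs : List Char) :
    (((PySem.Dict.counter xs).items.filter
        (fun p => !(decide ('a' ≤ p.1) && decide (p.1 ≤ 'm')))).map (·.2)).sum
      = (xs.countP (fun c => !(decide ('a' ≤ c) && decide (c ≤ 'm'))) : Int) := by
  rw [PySem.Dict.items_counter, List.filter_map, List.map_map]
  have hperm : ((PySem.Set.ofList xs).filter
      (fun k => !(decide ('a' ≤ k) && decide (k ≤ 'm')))).Perm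
      (xs.dedup.filter (fun k => !(decide ('a' ≤ k) && decide (k ≤ 'm')))) := by
    apply List.Perm.filter
    exact (List.perm_ext_iff_of_nodup (PySem.Set.nodup_ofList xs) xs.nodup_dedup).mpr
      (fun a => by simp [PySem.Set.mem_ofList, List.mem_dedup])
  calc (((PySem.Set.ofList xs).filter _).map _).sum
      = ((xs.dedup.filter (fun k => !(decide ('a' ≤ k) && decide (k ≤ 'm')))).map
          (fun k => ((xs.count k : Nat) : Int))).sum := (hperm.map _).sum_eq
    _ = _ := by
        rw [← List.sum_map_count_dedup_filter_eq_countP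
          (fun c => !(decide ('a' ≤ c) && decide (c ≤ 'm'))) xs]
        push_cast
        rw [List.map_map]
        rfl

-- ===== VERDICT (by name: the statement is the Claim_ definition above) =====
theorem printer_error_spec : Claim_equal_printer_error := by
  intro s _
  unfold Spec_printer_error printer_error printer_error_alt
  simp only [alphabet_eq, PySem.Dict.foldl_insert_getD_add_one_eq_counter, mem_alphabet]
  rw [diffB_eq, PySem.List.foldl_if_add_one, zero_add]
  by_cases h : PySem.Set.issubset (PySem.Set.ofList s.toList)
      (['a','b','c','d','e','f','g','h','i','j','k','l','m'] : PySem.Set Char) = true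
  · rw [if_pos h]
    have h0 : s.toList.countP (fun c => !(decide ('a' ≤ c) && decide (c ≤ 'm'))) = 0 := by
      rw [List.countP_eq_zero]
      intro c hc
      have := (PySem.Set.issubset_iff _ _).mp h c ((PySem.Set.mem_ofList _ _).mpr hc)
      simp only [List.mem_cons, List.not_mem_nil, or_false] at this
      rcases this with h'|h'|h'|h'|h'|h'|h'|h'|h'|h'|h'|h'|h' <;> subst h' <;> decide
    rw [h0, Nat.cast_zero,
      show (PySem.Int.toStr (0:Int) ++ "/") = "0/" from rfl]
  · rw [if_neg h]
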